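-- pv_equiv track=rewrite | github.com/sreekanthops/gspaces | main.py | build_tracking_timeline
-- ===== SOURCE A (Python) =====
-- ORDER_STATUS_LABELS = {
--     'placed': 'Order placed',
--     'confirmed': 'Confirmed',
--     'packed': 'Packed',
--     'shipped': 'Shipped',
--     'out_for_delivery': 'Out for delivery',
--     'delivered': 'Delivered',
--     'cancelled': 'Cancelled',
-- }
--
-- ORDER_STATUS_FLOW = ['placed', 'confirmed', 'packed', 'shipped', 'out_for_delivery', 'delivered']
--
-- def build_tracking_timeline(status_code):
--     if status_code == 'cancelled':
--         return [{
--             'label': ORDER_STATUS_LABELS['cancelled'],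
--             'state': 'current'
--         }]
--
--     current_index = ORDER_STATUS_FLOW.index(status_code) if status_code in ORDER_STATUS_FLOW else 0
--     timeline = []
--     for index, code in enumerate(ORDER_STATUS_FLOW):
--         state = 'upcoming'
--         if index < current_index:
--             state = 'complete'
--         elif index == current_index:
--             state = 'current'
--         timeline.append({
--             'code': code,
--             'label': ORDER_STATUS_LABELS[code],
--             'state': state
--         })
--     return timeline
-- ===== SOURCE B (Python) =====
-- ORDER_STATUS_LABELS = {
--     'placed': 'Order placed',
--     'confirmed': 'Confirmed',
--     'packed': 'Packed',
--     'shipped': 'Shipped',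
--     'out_for_delivery': 'Out for delivery',
--     'delivered': 'Delivered',
--     'cancelled': 'Cancelled',
-- }
--
-- ORDER_STATUS_FLOW = ['placed', 'confirmed', 'packed', 'shipped', 'out_for_delivery', 'delivered']
--
-- def _entry(code, state):
--     return {'code': code, 'label': ORDER_STATUS_LABELS[code], 'state': state}
--
-- def _walk(codes, target):
--     # Recursively search for target: None signals 'not found'.
--     if not codes:
--         return None
--     head, rest = codes[0], codes[1:]
--     if head == target:
--         return [_entry(head, 'current')] + [_entry(c, 'upcoming') for c in rest]
--     tail = _walk(rest, target)
--     if tail is None: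
--         return None
--     return [_entry(head, 'complete')] + tail
--
-- def build_tracking_timeline(status_code):
--     if status_code == 'cancelled':
--         return [{'label': ORDER_STATUS_LABELS['cancelled'], 'state': 'current'}]
--     result = _walk(ORDER_STATUS_FLOW, status_code)
--     if result is None:
--         result = _walk(ORDER_STATUS_FLOW, ORDER_STATUS_FLOW[0])
--     return result
-- ===== Notes on version B (the rewrite author's own statement) =====
-- stated objective: alternative
-- what changed: Replaces A's index computation (list.index + enumerate loop with index comparisons) by an index-free recursive search over the flow list that emits 'current' on the matching head and all-'upcoming' tail, with a None-signalled not-found retry targeting the first code to reproduce the invalid-status fallback.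
import Mathlib
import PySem

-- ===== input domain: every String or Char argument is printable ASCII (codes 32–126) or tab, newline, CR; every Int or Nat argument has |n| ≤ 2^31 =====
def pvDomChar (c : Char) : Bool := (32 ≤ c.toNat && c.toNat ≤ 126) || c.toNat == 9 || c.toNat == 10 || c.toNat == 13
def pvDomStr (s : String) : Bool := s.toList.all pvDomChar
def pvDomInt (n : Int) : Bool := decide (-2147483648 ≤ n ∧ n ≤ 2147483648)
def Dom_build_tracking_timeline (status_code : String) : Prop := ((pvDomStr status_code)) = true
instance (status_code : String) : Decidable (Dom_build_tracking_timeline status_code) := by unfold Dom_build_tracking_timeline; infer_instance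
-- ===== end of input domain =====

-- B replaces A's index-comparison loop by an index-free recursive search over the flow list (with a not-found retry for the invalid-status fallback); objective: alternative decomposition.


-- ===== PORT A =====
def pvLabels : PySem.Dict String String := PySem.Dict.ofList
  [("placed", "Order placed"), ("confirmed", "Confirmed"), ("packed", "Packed"),
   ("shipped", "Shipped"), ("out_for_delivery", "Out for delivery"),
   ("delivered", "Delivered"), ("cancelled", "Cancelled")]

def pvFlow : List String :=
  ["placed", "confirmed", "packed", "shipped", "out_for_delivery", "delivered"]

-- A: enumerate loop appending one dict per flow code, state chosen by index comparison.
def build_tracking_timeline (status_code : String) : List (List (String × String)) :=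
  if status_code == "cancelled" then
    [[("label", (pvLabels.get? "cancelled").getD ""), ("state", "current")]]
  else
    let current_index : Int :=
      if pvFlow.contains status_code then ((PySem.List.index? pvFlow status_code).getD 0 : Nat)
      else 0
    (PySem.List.enumerate pvFlow).foldl (fun timeline ic =>
      let state :=
        if ic.1 < current_index then "complete"
        else if ic.1 == current_index then "current"
        else "upcoming"
      timeline ++ [[("code", ic.2), ("label", (pvLabels.get? ic.2).getD ""), ("state", state)]]) []

-- ===== PORT B =====
def pvEntry (code state : String) : List (String × String) :=
  [("code", code), ("label", (pvLabels.get? code).getD ""), ("state", state)]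

-- B's recursive search: none signals 'target not found'.
def pvWalk (codes : List String) (target : String) : Option (List (List (String × String))) :=
  match codes with
  | [] => none
  | head :: rest =>
    if head == target then
      some ([pvEntry head "current"] ++ rest.map (fun c => pvEntry c "upcoming"))
    else
      match pvWalk rest target with
      | none => none
      | some tail => some ([pvEntry head "complete"] ++ tail)

def build_tracking_timeline_alt (status_code : String) : List (List (String × String)) :=
  if status_code == "cancelled" then
    [[("label", (pvLabels.get? "cancelled").getD ""), ("state", "current")]]
  else
    match pvWalk pvFlow status_code with
    | some result => result
    | none => (pvWalk pvFlow (((PySem.List.pyGet? pvFlow 0).getD ""))).getD []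

-- ===== PRECONDITION & SPEC =====
def Spec_build_tracking_timeline (status_code : String) (out : List (List (String × String))) : Prop := out = build_tracking_timeline_alt status_code
instance (status_code : String) (out : List (List (String × String))) : Decidable (Spec_build_tracking_timeline status_code out) := by unfold Spec_build_tracking_timeline; infer_instance

-- ===== CLAIM (what is proved, stated in full; the proofs are below) =====
def Claim_equal_build_tracking_timeline : Prop := ∀ (status_code : String), Dom_build_tracking_timeline status_code → Spec_build_tracking_timeline status_code (build_tracking_timeline status_code)

-- ===== LEMMAS AND PROOFS =====

-- Both programs depend on status_code only through equality with the seven fixed codes,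
-- so a finite case split closes the proof; the catch-all case needs all equality tests false.
theorem btt_default (s : String)
    (h0 : s ≠ "cancelled") (h1 : s ≠ "placed") (h2 : s ≠ "confirmed") (h3 : s ≠ "packed")
    (h4 : s ≠ "shipped") (h5 : s ≠ "out_for_delivery") (h6 : s ≠ "delivered") :
    build_tracking_timeline s = build_tracking_timeline_alt s := by
  have hc : pvFlow.contains s = false := by
    simp [pvFlow, List.contains_eq_mem]
    exact ⟨fun h => h1 h, fun h => h2 h, fun h => h3 h,
           fun h => h4 h, fun h => h5 h, fun h => h6 h⟩
  have hw : pvWalk pvFlow s = none := by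
    simp [pvFlow, pvWalk, beq_iff_eq,
      (Ne.symm h1), (Ne.symm h2), (Ne.symm h3), (Ne.symm h4), (Ne.symm h5), (Ne.symm h6)]
  simp only [build_tracking_timeline, build_tracking_timeline_alt, beq_iff_eq, h0, if_false, hc,
    Bool.false_eq_true, hw]
  decide

-- ===== VERDICT (by name: the statement is the Claim_ definition above) =====
theorem build_tracking_timeline_spec : Claim_equal_build_tracking_timeline := by
  intro s _
  unfold Spec_build_tracking_timeline
  by_cases h0 : s = "cancelled"; · subst h0; decide
  by_cases h1 : s = "placed"; · subst h1; decide
  by_cases h2 : s = "confirmed"; · subst h2; decide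
  by_cases h3 : s = "packed"; · subst h3; decide
  by_cases h4 : s = "shipped"; · subst h4; decide
  by_cases h5 : s = "out_for_delivery"; · subst h5; decide
  by_cases h6 : s = "delivered"; · subst h6; decide
  exact btt_default s h0 h1 h2 h3 h4 h5 h6
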